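-- pv_equiv track=rewrite | github.com/tangjiewei0336/ascii_choir | src/utils/chord_utils.py | find_note_tokens_in_range
-- ===== SOURCE A (Python) =====
-- def _find_note_tokens(content: str) -> list[tuple[int, int, str]]:
--     """按 token 边界扫描，返回所有音符/和弦 token 的 (start, end, text)。排除命令、休止等。"""
--     result = []
--     n = len(content)
--     i = 0
--     while i < n:
--         if content[i] in " \t\n|[]()":
--             i += 1
--             continue
--         j = i
--         while j < n and content[j] not in " \t\n|[]()":
--             j += 1
--         tok = content[i:j]
--         if "{" in tok or "}" in tok or tok.startswith("\\"):
--             i = j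
--             continue
--         if not tok or tok in ("-", "_"):
--             i = j
--             continue
--         if any(c in "1234567" for c in tok):
--             result.append((i, j, tok))
--         i = j
--     return result
--
-- def find_note_tokens_in_range(
--     content: str, start_pos: int, end_pos: int
-- ) -> list[tuple[int, int, str]]:
--     """返回与 [start_pos, end_pos) 有交集的全部音符 token"""
--     return [
--         (s, e, t)
--         for s, e, t in _find_note_tokens(content)
--         if s < end_pos and e > start_pos
--     ]
-- ===== SOURCE B (Python) =====
-- def _flush_tok(out, buf, end, start_pos, end_pos):
--     if not buf:
--         return
--     tok = "".join(buf)
--     if "{" in tok or "}" in tok or tok.startswith("\\") or tok in ("-", "_"):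
--         return
--     s = end - len(buf)
--     if any(c in "1234567" for c in tok) and s < end_pos and end > start_pos:
--         out.append((s, end, tok))
--
-- def find_note_tokens_in_range(content, start_pos, end_pos):
--     out = []
--     buf = []
--     pos = 0
--     for ch in content:
--         if ch in " \t\n|[]()":
--             _flush_tok(out, buf, pos, start_pos, end_pos)
--             buf = []
--         else:
--             buf.append(ch)
--         pos += 1
--     _flush_tok(out, buf, pos, start_pos, end_pos)
--     return out
-- ===== Notes on version B (the rewrite author's own statement) =====
-- stated objective: idiomatic
-- what changed: Replaced the nested-while index tokenizer that builds all tokens and then filters them with a single for-loop over the characters that accumulates the current token in a buffer and emits/filters it at each separator boundary, in one pass.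
import Mathlib
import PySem

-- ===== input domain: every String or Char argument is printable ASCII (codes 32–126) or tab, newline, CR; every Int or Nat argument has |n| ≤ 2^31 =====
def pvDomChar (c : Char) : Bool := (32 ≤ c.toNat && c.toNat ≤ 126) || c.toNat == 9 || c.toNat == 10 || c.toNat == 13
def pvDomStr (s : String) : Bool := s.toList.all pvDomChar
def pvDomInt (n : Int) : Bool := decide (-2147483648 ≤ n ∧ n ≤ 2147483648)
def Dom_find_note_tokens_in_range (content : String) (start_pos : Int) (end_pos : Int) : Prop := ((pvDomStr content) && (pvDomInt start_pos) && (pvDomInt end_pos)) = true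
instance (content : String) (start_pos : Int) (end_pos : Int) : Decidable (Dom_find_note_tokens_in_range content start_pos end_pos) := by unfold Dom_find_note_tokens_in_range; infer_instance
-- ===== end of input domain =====

-- B replaces A's nested-while tokenizer + post-filter with a single buffered pass that
-- flushes and filters each token at its separator boundary (idiomatic one-pass rewrite).

-- ===== PORT A =====
-- shared character classes (the literal strings " \t\n|[]()" and "1234567" of both Pythons)
def pvSep (c : Char) : Bool :=
  c == ' ' || c == '\t' || c == '\n' || c == '|' || c == '[' || c == ']' || c == '(' || c == ')'

def pvDigit (c : Char) : Bool :=
  c == '1' || c == '2' || c == '3' || c == '4' || c == '5' || c == '6' || c == '7'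

-- A's inner `while j < n and content[j] not in " \t\n|[]()"`: returns (token chars = content[i:j], rest)
def pvScan : List Char → List Char × List Char
  | [] => ([], [])
  | c :: cs => if pvSep c then ([], c :: cs)
      else
        let p := pvScan cs
        (c :: p.1, p.2)

theorem pvScan_rest_le (cs : List Char) : (pvScan cs).2.length ≤ cs.length := by
  induction cs with
  | nil => simp [pvScan]
  | cons c cs ih =>
    simp only [pvScan]
    split
    · simp
    · simpa using Nat.le_succ_of_le ih

theorem pvScan_rest_lt (c : Char) (cs : List Char) (h : ¬ pvSep c = true) :
    (pvScan (c :: cs)).2.length < (c :: cs).length := by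
  simp only [pvScan, if_neg h, List.length_cons]
  exact Nat.lt_succ_of_le (pvScan_rest_le cs)

-- A's outer `while i < n` as recursion on the remaining suffix, i tracking the index.
-- Token-text comparisons (`not tok`, `tok in ("-","_")`) are on the token's char list (exact).
def pvLoopA (cs : List Char) (i : Int) : List (Int × Int × String) :=
  match cs with
  | [] => []
  | c :: rest =>
    if hc : pvSep c = true then pvLoopA rest (i + 1)
    else
      let p := pvScan (c :: rest)
      let j := i + (p.1.length : Int)
      let tok := String.mk p.1
      if p.1.contains '{' || p.1.contains '}' || p.1.head? == some '\\' then pvLoopA p.2 j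
      else if p.1 == ([] : List Char) || p.1 == ['-'] || p.1 == ['_'] then pvLoopA p.2 j
      else if p.1.any pvDigit then (i, j, tok) :: pvLoopA p.2 j
      else pvLoopA p.2 j
termination_by cs.length
decreasing_by
  · simp
  all_goals exact pvScan_rest_lt c rest hc

def find_note_tokens_in_range (content : String) (start_pos : Int) (end_pos : Int) : List (Int × Int × String) :=
  (pvLoopA content.toList 0).filter (fun x => decide (x.1 < end_pos) && decide (x.2.1 > start_pos))

-- ===== PORT B =====
-- B's `_flush_tok`: emit the buffered token (with all filters) at boundary `endi`.
def pvFlush (buf : List Char) (endi sp ep : Int) : List (Int × Int × String) :=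
  if buf == ([] : List Char) then []
  else
    let tok := String.mk buf
    if buf.contains '{' || buf.contains '}' || buf.head? == some '\\' || buf == ['-'] || buf == ['_'] then []
    else
      let s := endi - (buf.length : Int)
      if buf.any pvDigit && decide (s < ep) && decide (endi > sp) then [(s, endi, tok)] else []

-- B's single `for ch in content` loop with the token buffer.
def pvLoopB : List Char → Int → List Char → Int → Int → List (Int × Int × String)
  | [], pos, buf, sp, ep => pvFlush buf pos sp ep
  | c :: cs, pos, buf, sp, ep =>
    if pvSep c then pvFlush buf pos sp ep ++ pvLoopB cs (pos + 1) [] sp ep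
    else pvLoopB cs (pos + 1) (buf ++ [c]) sp ep

def find_note_tokens_in_range_alt (content : String) (start_pos : Int) (end_pos : Int) : List (Int × Int × String) :=
  pvLoopB content.toList 0 [] start_pos end_pos

-- ===== PRECONDITION & SPEC =====
def Spec_find_note_tokens_in_range (content : String) (start_pos : Int) (end_pos : Int) (out : List (Int × Int × String)) : Prop := out = find_note_tokens_in_range_alt content start_pos end_pos
instance (content : String) (start_pos : Int) (end_pos : Int) (out : List (Int × Int × String)) : Decidable (Spec_find_note_tokens_in_range content start_pos end_pos out) := by unfold Spec_find_note_tokens_in_range; infer_instance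

-- ===== CLAIM (what is proved, stated in full; the proofs are below) =====
def Claim_equal_find_note_tokens_in_range : Prop := ∀ (content : String) (start_pos : Int) (end_pos : Int), Dom_find_note_tokens_in_range content start_pos end_pos → Spec_find_note_tokens_in_range content start_pos end_pos (find_note_tokens_in_range content start_pos end_pos)

-- ===== LEMMAS AND PROOFS =====

-- what pvLoopB does after the current token's boundary
def pvTail : List Char → Int → Int → Int → List (Int × Int × String)
  | [], _, _, _ => []
  | _ :: r', p, sp, ep => pvLoopB r' (p + 1) [] sp ep

theorem pvScan_head_sep (cs : List Char) :
    ∀ d ∈ (pvScan cs).2.head?, pvSep d = true := by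
  induction cs with
  | nil => simp [pvScan]
  | cons c cs ih =>
    simp only [pvScan]
    split
    · rename_i h; intro d hd; simp at hd; simpa [hd] using h
    · exact ih

theorem pvTail_eq (r : List Char) (p sp ep : Int)
    (h : ∀ d ∈ r.head?, pvSep d = true) :
    pvTail r p sp ep = pvLoopB r p [] sp ep := by
  cases r with
  | nil => simp [pvTail, pvLoopB, pvFlush]
  | cons d r' =>
    have hd : pvSep d = true := h d (by simp)
    simp [pvTail, pvLoopB, hd, pvFlush]

-- L2: running B's loop with buffer `buf` scans exactly A's token and flushes it
theorem pvLoopB_scan (cs : List Char) : ∀ (pos : Int) (buf : List Char) (sp ep : Int),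
    pvLoopB cs pos buf sp ep =
      pvFlush (buf ++ (pvScan cs).1) (pos + ((pvScan cs).1.length : Int)) sp ep ++
        pvTail (pvScan cs).2 (pos + ((pvScan cs).1.length : Int)) sp ep := by
  induction cs with
  | nil => intro pos buf sp ep; simp [pvScan, pvLoopB, pvTail]
  | cons c cs ih =>
    intro pos buf sp ep
    by_cases hc : pvSep c = true
    · simp [pvScan, pvLoopB, pvTail, hc]
    · simp only [pvScan, if_neg hc, pvLoopB, List.length_cons]
      rw [ih (pos + 1) (buf ++ [c]) sp ep]
      have harith : pos + 1 + ((pvScan cs).1.length : Int) =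
          pos + (((pvScan cs).1.length + 1 : Nat) : Int) := by push_cast; ring
      rw [harith]
      simp [List.append_assoc]

-- one outer-loop step of B, phrased via A's pvScan
theorem pvLoopB_step (c : Char) (rest : List Char) (i sp ep : Int) (hc : ¬ pvSep c = true) :
    pvLoopB (c :: rest) i [] sp ep =
      pvFlush (c :: (pvScan rest).1) (i + (((c :: (pvScan rest).1)).length : Int)) sp ep ++
        pvLoopB (pvScan rest).2 (i + (((c :: (pvScan rest).1)).length : Int)) [] sp ep := by
  rw [show pvLoopB (c :: rest) i [] sp ep = pvLoopB rest (i + 1) [c] sp ep from by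
        simp [pvLoopB, hc]]
  rw [pvLoopB_scan]
  rw [pvTail_eq _ _ _ _ (pvScan_head_sep rest)]
  have harith : i + 1 + ((pvScan rest).1.length : Int) =
      i + (((c :: (pvScan rest).1)).length : Int) := by push_cast [List.length_cons]; ring
  rw [harith]
  rfl

-- L1: B's loop from an empty buffer = the filter of A's loop
theorem pvLoopB_eq_filter (cs : List Char) (i sp ep : Int) :
    pvLoopB cs i [] sp ep =
      (pvLoopA cs i).filter (fun x => decide (x.1 < ep) && decide (x.2.1 > sp)) := by
  induction cs, i using pvLoopA.induct with
  | case1 i => simp [pvLoopB, pvLoopA, pvFlush]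
  | case2 i c rest hc ih =>
    simp only [pvLoopA, dif_pos hc]
    simp [pvLoopB, hc, pvFlush]
    exact ih
  | case3 i c rest hc p j hbr ih =>
    rw [pvLoopB_step c rest i sp ep hc]
    simp only [pvLoopA, dif_neg hc]
    simp only [p, j, pvScan, if_neg hc] at hbr ih ⊢
    rw [ih]
    simp only [pvFlush]
    rw [if_neg (by simp), if_pos (by simp only [Bool.or_eq_true] at hbr ⊢; tauto),
      if_pos hbr]
    simp
  | case4 i c rest hc p j hbr hd ih =>
    rw [pvLoopB_step c rest i sp ep hc]
    simp only [pvLoopA, dif_neg hc]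
    simp only [p, j, pvScan, if_neg hc] at hbr hd ih ⊢
    rw [ih]
    simp only [pvFlush]
    rw [if_neg (by simp),
      if_pos (by
        simp only [Bool.or_eq_true, beq_iff_eq] at hbr hd ⊢
        cases hd with
        | inl h' =>
          cases h' with
          | inl h => exact (List.cons_ne_nil c _ h).elim
          | inr h => exact Or.inl (Or.inr h)
        | inr h => exact Or.inr h),
      if_neg hbr, if_pos hd]
    simp
  | case5 i c rest hc p j hbr hd hdig ih =>
    rw [pvLoopB_step c rest i sp ep hc]
    simp only [pvLoopA, dif_neg hc]
    simp only [p, j, pvScan, if_neg hc] at hbr hd hdig ih ⊢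
    rw [ih]
    simp only [pvFlush]
    rw [if_neg (by simp),
      if_neg (by
        simp only [Bool.or_eq_true, beq_iff_eq] at hbr hd ⊢
        tauto),
      if_neg hbr, if_neg hd, if_pos hdig]
    have hs : i + (((c :: (pvScan rest).1)).length : Int) -
        (((c :: (pvScan rest).1)).length : Int) = i := by ring
    rw [hs, List.filter_cons, hdig]
    by_cases h1 : i < ep <;>
      by_cases h2 : sp < i + ((((pvScan rest).1.length : Int)) + 1) <;>
      simp [h1, h2]
  | case6 i c rest hc p j hbr hd hdig ih =>
    rw [pvLoopB_step c rest i sp ep hc]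
    simp only [pvLoopA, dif_neg hc]
    simp only [p, j, pvScan, if_neg hc] at hbr hd hdig ih ⊢
    rw [ih]
    simp only [pvFlush]
    rw [if_neg (by simp),
      if_neg (by
        simp only [Bool.or_eq_true, beq_iff_eq] at hbr hd ⊢
        tauto),
      if_neg (by
        simp only [Bool.and_eq_true] at hdig ⊢
        tauto),
      if_neg hbr, if_neg hd, if_neg hdig]
    simp

-- ===== VERDICT (by name: the statement is the Claim_ definition above) =====
theorem find_note_tokens_in_range_spec : Claim_equal_find_note_tokens_in_range := by
  intro content start_pos end_pos _
  unfold Spec_find_note_tokens_in_range find_note_tokens_in_range find_note_tokens_in_range_alt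
  exact (pvLoopB_eq_filter content.toList 0 start_pos end_pos).symm
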